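-- pv_equiv track=rewrite | github.com/oohalakkadi/clinicrush | backend/api/trials.py | is_different_region
-- ===== SOURCE A (Python) =====
-- def is_different_region(state1, state2):
--     """Check if states are in different regions (to skip distant locations)"""
--     regions = {
--         'west': ['ca', 'wa', 'or', 'nv', 'id', 'mt', 'wy', 'co', 'ut', 'az', 'nm', 'hi', 'ak'],
--         'midwest': ['nd', 'sd', 'ne', 'ks', 'mn', 'ia', 'mo', 'wi', 'il', 'in', 'mi', 'oh'],
--         'south': ['tx', 'ok', 'ar', 'la', 'ms', 'al', 'tn', 'ky', 'wv', 'va', 'nc', 'sc', 'ga', 'fl'],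
--         'northeast': ['me', 'nh', 'vt', 'ma', 'ri', 'ct', 'ny', 'pa', 'nj', 'de', 'md', 'dc']
--     }
--
--     state_map = {
--         'alabama': 'al', 'alaska': 'ak', 'arizona': 'az', 'arkansas': 'ar', 'california': 'ca',
--         'colorado': 'co', 'connecticut': 'ct', 'delaware': 'de', 'florida': 'fl', 'georgia': 'ga',
--         'hawaii': 'hi', 'idaho': 'id', 'illinois': 'il', 'indiana': 'in', 'iowa': 'ia',
--         'kansas': 'ks', 'kentucky': 'ky', 'louisiana': 'la', 'maine': 'me', 'maryland': 'md',
--         'massachusetts': 'ma', 'michigan': 'mi', 'minnesota': 'mn', 'mississippi': 'ms',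
--         'missouri': 'mo', 'montana': 'mt', 'nebraska': 'ne', 'nevada': 'nv', 'new hampshire': 'nh',
--         'new jersey': 'nj', 'new mexico': 'nm', 'new york': 'ny', 'north carolina': 'nc',
--         'north dakota': 'nd', 'ohio': 'oh', 'oklahoma': 'ok', 'oregon': 'or', 'pennsylvania': 'pa',
--         'rhode island': 'ri', 'south carolina': 'sc', 'south dakota': 'sd', 'tennessee': 'tn',
--         'texas': 'tx', 'utah': 'ut', 'vermont': 'vt', 'virginia': 'va', 'washington': 'wa',
--         'west virginia': 'wv', 'wisconsin': 'wi', 'wyoming': 'wy'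
--     }
--
--     # Convert to state codes (case insensitive)
--     state1 = state1.lower().strip()
--     state2 = state2.lower().strip()
--
--     # Convert to codes if full state names
--     state1_code = state1 if len(state1) <= 2 else state_map.get(state1, '')
--     state2_code = state2 if len(state2) <= 2 else state_map.get(state2, '')
--
--     # Find regions
--     state1_region = None
--     state2_region = None
--
--     for region, states in regions.items():
--         if state1_code in states:
--             state1_region = region
--         if state2_code in states:
--             state2_region = region
--
--     # If both states have known regions and they're different
--     return state1_region and state2_region and state1_region != state2_region
-- ===== SOURCE B (Python) =====
-- _STATE_MAP = {
--     'alabama': 'al', 'alaska': 'ak', 'arizona': 'az', 'arkansas': 'ar', 'california': 'ca',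
--     'colorado': 'co', 'connecticut': 'ct', 'delaware': 'de', 'florida': 'fl', 'georgia': 'ga',
--     'hawaii': 'hi', 'idaho': 'id', 'illinois': 'il', 'indiana': 'in', 'iowa': 'ia',
--     'kansas': 'ks', 'kentucky': 'ky', 'louisiana': 'la', 'maine': 'me', 'maryland': 'md',
--     'massachusetts': 'ma', 'michigan': 'mi', 'minnesota': 'mn', 'mississippi': 'ms',
--     'missouri': 'mo', 'montana': 'mt', 'nebraska': 'ne', 'nevada': 'nv', 'new hampshire': 'nh',
--     'new jersey': 'nj', 'new mexico': 'nm', 'new york': 'ny', 'north carolina': 'nc',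
--     'north dakota': 'nd', 'ohio': 'oh', 'oklahoma': 'ok', 'oregon': 'or', 'pennsylvania': 'pa',
--     'rhode island': 'ri', 'south carolina': 'sc', 'south dakota': 'sd', 'tennessee': 'tn',
--     'texas': 'tx', 'utah': 'ut', 'vermont': 'vt', 'virginia': 'va', 'washington': 'wa',
--     'west virginia': 'wv', 'wisconsin': 'wi', 'wyoming': 'wy'
-- }
--
-- # All 51 codes in one flat sequence, grouped by region (west | midwest | south | northeast).
-- _ALL_CODES = ('ca wa or nv id mt wy co ut az nm hi ak '
--               'nd sd ne ks mn ia mo wi il in mi oh '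
--               'tx ok ar la ms al tn ky wv va nc sc ga fl '
--               'me nh vt ma ri ct ny pa nj de md dc').split()
--
-- # Region = bucket of the code's position in the flat sequence: [0,13) [13,25) [25,39) [39,51).
-- _BOUNDS = (13, 25, 39)
--
--
-- def _region_index(code):
--     """Bucket number of the code's position in the flat sequence, or None if unknown."""
--     try:
--         i = _ALL_CODES.index(code)
--     except ValueError:
--         return None
--     return sum(b <= i for b in _BOUNDS)
--
--
-- def is_different_region(state1, state2):
--     """Check if states are in different regions (to skip distant locations)"""
--     s1 = state1.lower().strip()
--     s2 = state2.lower().strip()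
--
--     code1 = s1 if len(s1) <= 2 else _STATE_MAP.get(s1, '')
--     code2 = s2 if len(s2) <= 2 else _STATE_MAP.get(s2, '')
--
--     r1 = _region_index(code1)
--     r2 = _region_index(code2)
--
--     return r1 != r2 if r1 is not None and r2 is not None else None
-- ===== Notes on version B (the rewrite author's own statement) =====
-- stated objective: alternative
-- what changed: Drops region names and the dict-of-lists entirely: B finds each code's position in one flat 51-code sequence and buckets that position arithmetically against region boundaries (13/25/39), comparing bucket numbers instead of looping over four region lists collecting region-name strings.
import Mathlib
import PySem

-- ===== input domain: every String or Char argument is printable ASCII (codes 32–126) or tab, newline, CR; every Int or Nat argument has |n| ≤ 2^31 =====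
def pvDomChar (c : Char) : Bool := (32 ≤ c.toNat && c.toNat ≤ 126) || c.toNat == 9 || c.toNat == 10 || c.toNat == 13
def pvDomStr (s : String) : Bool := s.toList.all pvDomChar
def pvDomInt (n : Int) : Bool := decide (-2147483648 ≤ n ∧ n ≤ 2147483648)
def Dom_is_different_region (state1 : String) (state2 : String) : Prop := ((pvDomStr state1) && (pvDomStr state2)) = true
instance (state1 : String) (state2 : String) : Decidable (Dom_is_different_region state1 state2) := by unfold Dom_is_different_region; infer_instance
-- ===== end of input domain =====

-- B drops region names and the dict-of-lists: it finds each code's position in one flat 51-code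
-- sequence and buckets that position arithmetically, comparing bucket numbers. Objective: alternative; no speed claim.

set_option maxRecDepth 8192

-- ===== PORT A =====
def pvRegions : List (String × List String) :=
  [("west", ["ca", "wa", "or", "nv", "id", "mt", "wy", "co", "ut", "az", "nm", "hi", "ak"]),
   ("midwest", ["nd", "sd", "ne", "ks", "mn", "ia", "mo", "wi", "il", "in", "mi", "oh"]),
   ("south", ["tx", "ok", "ar", "la", "ms", "al", "tn", "ky", "wv", "va", "nc", "sc", "ga", "fl"]),
   ("northeast", ["me", "nh", "vt", "ma", "ri", "ct", "ny", "pa", "nj", "de", "md", "dc"])]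

def pvStateMap : PySem.Dict String String :=
  PySem.Dict.ofList
  [("alabama", "al"), ("alaska", "ak"), ("arizona", "az"), ("arkansas", "ar"),
   ("california", "ca"), ("colorado", "co"), ("connecticut", "ct"), ("delaware", "de"),
   ("florida", "fl"), ("georgia", "ga"), ("hawaii", "hi"), ("idaho", "id"),
   ("illinois", "il"), ("indiana", "in"), ("iowa", "ia"), ("kansas", "ks"),
   ("kentucky", "ky"), ("louisiana", "la"), ("maine", "me"), ("maryland", "md"),
   ("massachusetts", "ma"), ("michigan", "mi"), ("minnesota", "mn"), ("mississippi", "ms"),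
   ("missouri", "mo"), ("montana", "mt"), ("nebraska", "ne"), ("nevada", "nv"),
   ("new hampshire", "nh"), ("new jersey", "nj"), ("new mexico", "nm"), ("new york", "ny"),
   ("north carolina", "nc"), ("north dakota", "nd"), ("ohio", "oh"), ("oklahoma", "ok"),
   ("oregon", "or"), ("pennsylvania", "pa"), ("rhode island", "ri"), ("south carolina", "sc"),
   ("south dakota", "sd"), ("tennessee", "tn"), ("texas", "tx"), ("utah", "ut"),
   ("vermont", "vt"), ("virginia", "va"), ("washington", "wa"), ("west virginia", "wv"),
   ("wisconsin", "wi"), ("wyoming", "wy")]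

def is_different_region (state1 : String) (state2 : String) : Option Bool :=
  let s1 := PySem.Str.strip (PySem.Str.lower state1)
  let s2 := PySem.Str.strip (PySem.Str.lower state2)
  let c1 := if PySem.Str.len s1 ≤ 2 then s1 else pvStateMap.getD s1 ""
  let c2 := if PySem.Str.len s2 ≤ 2 then s2 else pvStateMap.getD s2 ""
  let rp := pvRegions.foldl
    (fun (p : Option String × Option String) rs =>
      (if rs.2.contains c1 then some rs.1 else p.1,
       if rs.2.contains c2 then some rs.1 else p.2)) (none, none)
  match rp.1 with
  | none => none
  | some r1 =>
    match rp.2 with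
    | none => none
    | some r2 => some (r1 != r2)

-- ===== PORT B =====
-- the flat 51-code sequence of Source B, grouped by region (west | midwest | south | northeast)
def pvAllCodes : List String :=
  ["ca", "wa", "or", "nv", "id", "mt", "wy", "co", "ut", "az", "nm", "hi", "ak",
   "nd", "sd", "ne", "ks", "mn", "ia", "mo", "wi", "il", "in", "mi", "oh",
   "tx", "ok", "ar", "la", "ms", "al", "tn", "ky", "wv", "va", "nc", "sc", "ga", "fl",
   "me", "nh", "vt", "ma", "ri", "ct", "ny", "pa", "nj", "de", "md", "dc"]

def pvBounds : List Nat := [13, 25, 39]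

-- Source B's _region_index: position in the flat sequence, bucketed against the bounds
def pvRegionIndex (code : String) : Option Nat :=
  match PySem.List.index? pvAllCodes code with
  | none => none
  | some i => some (pvBounds.foldl (fun n b => if b ≤ i then n + 1 else n) 0)

def is_different_region_alt (state1 : String) (state2 : String) : Option Bool :=
  let s1 := PySem.Str.strip (PySem.Str.lower state1)
  let s2 := PySem.Str.strip (PySem.Str.lower state2)
  let c1 := if PySem.Str.len s1 ≤ 2 then s1 else pvStateMap.getD s1 ""
  let c2 := if PySem.Str.len s2 ≤ 2 then s2 else pvStateMap.getD s2 ""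
  match pvRegionIndex c1, pvRegionIndex c2 with
  | some r1, some r2 => some (decide (r1 ≠ r2))
  | _, _ => none

-- ===== PRECONDITION & SPEC =====
def Spec_is_different_region (state1 : String) (state2 : String) (out : Option Bool) : Prop := out = is_different_region_alt state1 state2
instance (state1 : String) (state2 : String) (out : Option Bool) : Decidable (Spec_is_different_region state1 state2 out) := by unfold Spec_is_different_region; infer_instance

-- ===== CLAIM =====
def Claim_equal_is_different_region : Prop := ∀ (state1 : String) (state2 : String), Dom_is_different_region state1 state2 → Spec_is_different_region state1 state2 (is_different_region state1 state2)

-- ===== LEMMAS AND PROOFS =====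

-- A's per-code region resolution, taken componentwise out of the pair fold
def pvRegionOf (c : String) : Option String :=
  pvRegions.foldl (fun r rs => if rs.2.contains c then some rs.1 else r) none

-- name of B's bucket i (0..3)
def pvName (i : Nat) : String :=
  if i = 0 then "west" else if i = 1 then "midwest" else if i = 2 then "south" else "northeast"

lemma pvPairFold_eq (c1 c2 : String) :
    pvRegions.foldl
      (fun (p : Option String × Option String) rs =>
        (if rs.2.contains c1 then some rs.1 else p.1,
         if rs.2.contains c2 then some rs.1 else p.2)) (none, none)
    = (pvRegionOf c1, pvRegionOf c2) := rfl

lemma pvBridge (c : String) :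
    pvRegionOf c = (pvRegionIndex c).map pvName ∧ ∀ i ∈ pvRegionIndex c, i < 4 := by
  by_cases h : c ∈ pvAllCodes
  · simp only [pvAllCodes, List.mem_cons, List.not_mem_nil, or_false] at h
    rcases h with rfl|rfl|rfl|rfl|rfl|rfl|rfl|rfl|rfl|rfl|rfl|rfl|rfl|rfl|rfl|rfl|rfl|rfl|rfl|rfl|rfl|rfl|rfl|rfl|rfl|rfl|rfl|rfl|rfl|rfl|rfl|rfl|rfl|rfl|rfl|rfl|rfl|rfl|rfl|rfl|rfl|rfl|rfl|rfl|rfl|rfl|rfl|rfl|rfl|rfl|rfl <;> exact ⟨by decide, by decide⟩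
  · have hidx : List.idxOf? c pvAllCodes = none := List.idxOf?_eq_none_iff.mpr h
    have hreg : pvRegionOf c = none := by
      simp only [pvAllCodes, List.mem_cons, List.not_mem_nil, or_false, not_or] at h
      obtain ⟨h0, h1, h2, h3, h4, h5, h6, h7, h8, h9, h10, h11, h12, h13, h14, h15, h16, h17, h18, h19, h20, h21, h22, h23, h24, h25, h26, h27, h28, h29, h30, h31, h32, h33, h34, h35, h36, h37, h38, h39, h40, h41, h42, h43, h44, h45, h46, h47, h48, h49, h50⟩ := h
      simp [pvRegionOf, pvRegions,
        h0, h1, h2, h3, h4, h5, h6, h7, h8, h9, h10, h11, h12, h13, h14, h15, h16, h17, h18, h19, h20, h21, h22, h23, h24, h25, h26, h27, h28, h29, h30, h31, h32, h33, h34, h35, h36, h37, h38, h39, h40, h41, h42, h43, h44, h45, h46, h47, h48, h49, h50]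
    refine ⟨?_, ?_⟩
    · simp [hreg, pvRegionIndex, hidx]
    · simp [pvRegionIndex, hidx]

lemma pvName_inj {i j : Nat} (hi : i < 4) (hj : j < 4) : (pvName i != pvName j) = decide (i ≠ j) := by
  interval_cases i <;> interval_cases j <;> rfl

-- ===== VERDICT =====
theorem is_different_region_spec : Claim_equal_is_different_region := by
  intro state1 state2 _
  unfold Spec_is_different_region is_different_region is_different_region_alt
  simp only [pvPairFold_eq]
  set c1 := (if PySem.Str.len (PySem.Str.strip (PySem.Str.lower state1)) ≤ 2 then PySem.Str.strip (PySem.Str.lower state1) else pvStateMap.getD (PySem.Str.strip (PySem.Str.lower state1)) "") with hc1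
  set c2 := (if PySem.Str.len (PySem.Str.strip (PySem.Str.lower state2)) ≤ 2 then PySem.Str.strip (PySem.Str.lower state2) else pvStateMap.getD (PySem.Str.strip (PySem.Str.lower state2)) "") with hc2
  obtain ⟨he1, hb1⟩ := pvBridge c1
  obtain ⟨he2, hb2⟩ := pvBridge c2
  simp only [he1, he2]
  cases h1 : pvRegionIndex c1 with
  | none => rfl
  | some i =>
    cases h2 : pvRegionIndex c2 with
    | none => rfl
    | some j =>
      have hi := hb1 i (by rw [h1]; rfl)
      have hj := hb2 j (by rw [h2]; rfl)
      simp [Option.map, pvName_inj hi hj]
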